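-- pv_equiv track=rewrite | github.com/TamNhien/P_In_List_MaHoa | P_In_List_MaHoa.py | ma_hoa_list
-- ===== SOURCE A (Python) =====
-- def ma_hoa_list(L):
--     D = {}  # Khởi tạo dictionary mã hóa
--     L_mahoa = []  # Khởi tạo list mã hóa
--
--     for phan_tu in L:  # Duyệt qua từng phần tử trong list L
--         if phan_tu not in D:  # Kiểm tra xem phần tử đã được mã hóa chưa
--             D[phan_tu] = len(D)  # Thêm phần tử vào dictionary với giá trị là số thứ tự
--         L_mahoa.append(D[phan_tu])  # Thêm giá trị mã hóa của phần tử vào list mã hóa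
--
--     return L_mahoa  # Trả về list đã được mã hóa
-- ===== SOURCE B (Python) =====
-- def ma_hoa_list(L):
--     # label of x = number of distinct elements before the first occurrence of x
--     return [len(set(L[:L.index(x)])) for x in L]
-- ===== Notes on version B (the rewrite author's own statement) =====
-- stated objective: alternative
-- what changed: Drops the incrementally-grown encoding dict entirely: B computes each label directly as the number of distinct elements preceding that element's first occurrence (len(set(L[:L.index(x)]))), a per-element counting formula instead of A's stateful table built in one guarded pass.
import Mathlib
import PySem

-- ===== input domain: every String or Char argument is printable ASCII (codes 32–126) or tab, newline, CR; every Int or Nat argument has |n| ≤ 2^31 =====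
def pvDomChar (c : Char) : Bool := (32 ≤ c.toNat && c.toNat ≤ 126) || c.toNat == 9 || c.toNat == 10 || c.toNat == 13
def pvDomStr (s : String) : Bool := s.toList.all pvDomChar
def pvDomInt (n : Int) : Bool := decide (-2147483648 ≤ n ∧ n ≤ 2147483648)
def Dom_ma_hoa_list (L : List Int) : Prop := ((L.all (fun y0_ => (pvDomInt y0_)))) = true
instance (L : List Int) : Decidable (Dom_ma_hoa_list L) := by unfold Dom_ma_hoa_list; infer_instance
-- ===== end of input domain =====

-- B replaces A's stateful encoding dict by a stateless counting formula: the label of x is the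
-- number of distinct elements before x's first occurrence. Objective: alternative algorithm, not faster.

-- ===== PORT A =====
-- A: one loop carrying the encoding dict and the output list; D[x] is always present when read,
-- so the lookup is ported as getD with a dummy default.
def ma_hoa_list (L : List Int) : List Int :=
  (L.foldl
    (fun (st : PySem.Dict Int Int × List Int) phan_tu =>
      let D := if st.1.contains phan_tu then st.1 else st.1.insert phan_tu (st.1.size : Int)
      (D, st.2 ++ [D.getD phan_tu 0]))
    (PySem.Dict.empty, [])).2

-- ===== PORT B =====
-- B: len(set(L[:L.index(x)])) per element; L.index(x) always succeeds (x ∈ L), ported as index? + getD.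
def ma_hoa_list_alt (L : List Int) : List Int :=
  L.map (fun x =>
    PySem.Set.len (PySem.Set.ofList
      (PySem.List.slice L none (some (((PySem.List.index? L x).getD 0 : Nat) : Int)))))

-- ===== PRECONDITION & SPEC =====
def Spec_ma_hoa_list (L : List Int) (out : List Int) : Prop := out = ma_hoa_list_alt L
instance (L : List Int) (out : List Int) : Decidable (Spec_ma_hoa_list L out) := by unfold Spec_ma_hoa_list; infer_instance

-- ===== CLAIM (what is proved, stated in full; the proofs are below) =====
def Claim_equal_ma_hoa_list : Prop := ∀ (L : List Int), Dom_ma_hoa_list L → Spec_ma_hoa_list L (ma_hoa_list L)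

-- ===== LEMMAS AND PROOFS =====

-- index into the deduplicated list is stable under updating with more elements, for already-seen elements
lemma index?_update_of_mem (u : List Int) (xs : List Int) (v : Int) (hv : v ∈ u) :
    PySem.List.index? (PySem.Set.update u xs) v = PySem.List.index? u v := by
  rw [PySem.Set.update_eq_append_filter, PySem.List.index?_append_of_mem _ hv]

-- main loop invariant: if d encodes exactly the distinct elements u seen so far (keys, size, values),
-- the rest of A's loop appends the labels computed as ranks in the final dedup table
lemma ma_hoa_loop (L : List Int) : ∀ (u : List Int) (d : PySem.Dict Int Int) (acc : List Int),
    u.Nodup →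
    (∀ x, d.contains x = decide (x ∈ u)) →
    d.size = u.length →
    (∀ x ∈ u, d.getD x 0 = (((PySem.List.index? u x).getD 0 : Nat) : Int)) →
    (L.foldl
      (fun (st : PySem.Dict Int Int × List Int) phan_tu =>
        let D := if st.1.contains phan_tu then st.1 else st.1.insert phan_tu (st.1.size : Int)
        (D, st.2 ++ [D.getD phan_tu 0]))
      (d, acc)).2
    = acc ++ L.map (fun x => (((PySem.List.index? (PySem.Set.update u L) x).getD 0 : Nat) : Int)) := by
  induction L with
  | nil => intro u d acc _ _ _ _; simp
  | cons x L ih =>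
    intro u d acc hnd hcont hsize hget
    by_cases hx : x ∈ u
    · -- already seen: dict unchanged
      have hc : d.contains x = true := by rw [hcont]; simp [hx]
      simp only [List.foldl_cons, hc, if_true]
      rw [ih u d _ hnd hcont hsize hget]
      rw [PySem.Set.update_cons, PySem.Set.add_of_mem hx]
      rw [List.map_cons, index?_update_of_mem u L x hx, ← hget x hx]
      simp
    · -- new element: insert with label u.length
      have hc : d.contains x = false := by rw [hcont]; simp [hx]
      simp only [List.foldl_cons, hc, Bool.false_eq_true, if_false]
      have hnd' : (u ++ [x]).Nodup := by
        rw [List.nodup_append]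
        refine ⟨hnd, List.nodup_singleton x, ?_⟩
        intro a ha b hb
        simp at hb
        subst hb
        exact fun h => hx (h ▸ ha)
      have hcont' : ∀ y, (d.insert x (d.size : Int)).contains y = decide (y ∈ u ++ [x]) := by
        intro y
        rw [PySem.Dict.contains_insert, hcont]
        by_cases hy : y = x <;> simp [hy]
      have hsize' : (d.insert x (d.size : Int)).size = (u ++ [x]).length := by
        rw [PySem.Dict.size_insert, hc]; simp [hsize]
      have hget' : ∀ y ∈ u ++ [x],
          (d.insert x (d.size : Int)).getD y 0 = (((PySem.List.index? (u ++ [x]) y).getD 0 : Nat) : Int) := by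
        intro y hy
        by_cases hyx : y = x
        · rw [hyx, PySem.Dict.getD_insert_self, PySem.List.index?_append_singleton_self u x hx, hsize]
          simp
        · have hyu : y ∈ u := by
            rcases List.mem_append.mp hy with h | h
            · exact h
            · simp at h; exact absurd h hyx
          rw [PySem.Dict.getD_insert_of_ne d _ _ hyx, hget y hyu,
              PySem.List.index?_append_of_mem _ hyu]
      rw [ih (u ++ [x]) _ _ hnd' hcont' hsize' hget']
      rw [PySem.Set.update_cons, PySem.Set.add_of_not_mem hx]
      have hxin : x ∈ u ++ [x] := by simp
      rw [List.map_cons, index?_update_of_mem _ L x hxin,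
          PySem.List.index?_append_singleton_self u x hx,
          PySem.Dict.getD_insert_self, hsize]
      simp

-- bridge: the rank of x in the dedup of L equals the number of distinct elements
-- in the prefix of L before x's first occurrence
lemma rank_eq_prefix_count (L : List Int) (x : Int) (hx : x ∈ L) :
    (PySem.List.index? (PySem.Set.ofList L) x).getD 0
      = (PySem.Set.ofList (L.take ((PySem.List.index? L x).getD 0))).length := by
  obtain ⟨k, hk⟩ := Option.isSome_iff_exists.mp ((PySem.List.index?_isSome_iff L x).mpr hx)
  obtain ⟨P, S, hL, hPlen, hxP⟩ := (PySem.List.index?_eq_some_iff L x k).mp hk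
  have hxPd : x ∉ PySem.Set.ofList P := by
    rw [PySem.Set.mem_ofList]; exact hxP
  have htake : L.take ((PySem.List.index? L x).getD 0) = P := by
    rw [hk, Option.getD_some, ← hPlen, hL, List.take_left]
  rw [htake, hL]
  have h1 : PySem.Set.ofList (P ++ x :: S)
      = PySem.Set.update (PySem.Set.add (PySem.Set.ofList P) x) S := by
    rw [PySem.Set.ofList_append, PySem.Set.update_cons]
  rw [h1, PySem.Set.add_of_not_mem hxPd,
      index?_update_of_mem _ _ _ (by simp),
      PySem.List.index?_append_singleton_self _ _ hxPd]
  simp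

-- ===== VERDICT (by name: the statement is the Claim_ definition above) =====
theorem ma_hoa_list_spec : Claim_equal_ma_hoa_list := by
  intro L _
  unfold Spec_ma_hoa_list ma_hoa_list ma_hoa_list_alt
  rw [ma_hoa_loop L [] PySem.Dict.empty [] (by simp)
        (by intro x; simp [PySem.Dict.contains_empty])
        (by simp [PySem.Dict.size_empty])
        (by intro x hx; simp at hx)]
  rw [PySem.Set.update_nil_left, List.nil_append]
  apply List.map_congr_left
  intro x hx
  rw [PySem.List.slice_to_natCast, rank_eq_prefix_count L x hx, PySem.Set.len]
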